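-- pv_equiv track=rewrite | github.com/whmc76/RoughCut | src/roughcut/media/subtitles.py | _term_ranges_in_text
-- ===== SOURCE A (Python) =====
-- def _term_ranges_in_text(text: str, terms: list[str]) -> list[tuple[int, int]]:
--     ranges: list[tuple[int, int]] = []
--     for term in terms:
--         normalized = str(term or "").strip()
--         if len(normalized) < 2:
--             continue
--         search_start = 0
--         while search_start < len(text):
--             index = text.find(normalized, search_start)
--             if index < 0:
--                 break
--             ranges.append((index, index + len(normalized)))
--             search_start = index + len(normalized)
--     return ranges
-- ===== SOURCE B (Python) =====
-- def _term_ranges_in_text(text: str, terms: list[str]) -> list[tuple[int, int]]: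
--     out: list[tuple[int, int]] = []
--     n = len(text)
--     for term in terms:
--         t = str(term or "").strip()
--         m = len(t)
--         if m < 2:
--             continue
--         prev_end = 0
--         for i in range(n + 1 - m):
--             if i >= prev_end and text[i:i + m] == t:
--                 out.append((i, i + m))
--                 prev_end = i + m
--     return out
-- ===== Notes on version B (the rewrite author's own statement) =====
-- stated objective: alternative
-- what changed: Per term, B enumerates every candidate start position with a single left-to-right slice-comparison scan and a greedy prev_end filter, instead of A's repeated str.find calls with a moving search_start.
import Mathlib
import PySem

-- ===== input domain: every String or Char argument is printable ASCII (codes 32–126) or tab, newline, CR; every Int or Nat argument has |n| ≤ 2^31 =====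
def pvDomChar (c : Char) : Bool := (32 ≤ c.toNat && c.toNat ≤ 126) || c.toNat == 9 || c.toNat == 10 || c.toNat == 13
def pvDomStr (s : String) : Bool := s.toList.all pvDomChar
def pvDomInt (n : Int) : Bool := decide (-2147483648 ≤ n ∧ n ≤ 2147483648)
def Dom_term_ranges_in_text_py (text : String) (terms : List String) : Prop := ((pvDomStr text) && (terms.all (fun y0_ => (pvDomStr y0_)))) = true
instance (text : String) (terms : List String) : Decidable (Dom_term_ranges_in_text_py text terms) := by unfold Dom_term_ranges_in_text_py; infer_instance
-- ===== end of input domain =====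

-- B replaces A's repeated str.find/search_start loop by a single left-to-right scan over all
-- candidate start positions with a greedy prev_end filter (objective: alternative decomposition).

-- ===== PORT A =====
-- the inner 'while search_start < len(text)' loop of A; fuel makes it total (the loop is only
-- entered with a term of length ≥ 2, so search_start strictly increases and tl.length + 1 fuel suffices)
def pvAloop (tl t : List Char) (m : Nat) : Nat → Nat → List (Int × Int)
  | 0, _ => []
  | fuel + 1, s =>
    if s < tl.length then
      let j := PySem.Chars.findFrom tl t (s : Int) none
      if j < 0 then []
      else (j, j + (m : Int)) :: pvAloop tl t m fuel (j.toNat + m)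
    else []

def term_ranges_in_text_py (text : String) (terms : List String) : List (Int × Int) :=
  terms.foldl (fun ranges term =>
    -- 'str(term or "")' is 'term' for a str argument ('' stays ''), so normalized = term.strip()
    let normalized := (PySem.Str.strip term).toList
    if normalized.length < 2 then ranges
    else ranges ++ pvAloop text.toList normalized normalized.length (text.toList.length + 1) 0) []

-- ===== PORT B =====
-- the inner 'for i in range(n + 1 - m)' loop of B, over the explicit list of candidate starts
def pvBloop (tl t : List Char) (m : Nat) : List Nat → Nat → List (Int × Int)
  | [], _ => []
  | i :: is, p =>
    if p ≤ i ∧ PySem.List.slice tl (some (i : Int)) (some ((i : Int) + (m : Int))) = t then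
      ((i : Int), (i : Int) + (m : Int)) :: pvBloop tl t m is (i + m)
    else pvBloop tl t m is p

def term_ranges_in_text_py_alt (text : String) (terms : List String) : List (Int × Int) :=
  terms.foldl (fun out term =>
    let t := (PySem.Str.strip term).toList
    if t.length < 2 then out
    else out ++ pvBloop text.toList t t.length (List.range (text.toList.length + 1 - t.length)) 0) []

-- ===== PRECONDITION & SPEC =====
def Spec_term_ranges_in_text_py (text : String) (terms : List String) (out : List (Int × Int)) : Prop := out = term_ranges_in_text_py_alt text terms
instance (text : String) (terms : List String) (out : List (Int × Int)) : Decidable (Spec_term_ranges_in_text_py text terms out) := by unfold Spec_term_ranges_in_text_py; infer_instance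

-- ===== CLAIM (what is proved, stated in full; the proofs are below) =====
def Claim_equal_term_ranges_in_text_py : Prop := ∀ (text : String) (terms : List String), Dom_term_ranges_in_text_py text terms → Spec_term_ranges_in_text_py text terms (term_ranges_in_text_py text terms)

-- ===== LEMMAS AND PROOFS =====

-- the candidate-position condition B tests, as a Prop on the index
def pvMatch (tl t : List Char) (i : Nat) : Prop := t <+: tl.drop i

theorem pvBloop_cond_pos (tl t : List Char) (m : Nat) (ht : t.length = m) (i p : Nat) (is : List Nat)
    (h : p ≤ i ∧ pvMatch tl t i) :
    pvBloop tl t m (i :: is) p = ((i : Int), (i : Int) + (m : Int)) :: pvBloop tl t m is (i + m) := by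
  rw [pvBloop, if_pos]
  refine ⟨h.1, ?_⟩
  rw [PySem.List.slice_natCast_add]
  have := (List.prefix_iff_eq_take.mp h.2)
  rw [ht] at this
  exact this.symm

theorem pvBloop_cond_neg (tl t : List Char) (m : Nat) (ht : t.length = m) (i p : Nat) (is : List Nat)
    (h : ¬ (p ≤ i ∧ pvMatch tl t i)) :
    pvBloop tl t m (i :: is) p = pvBloop tl t m is p := by
  rw [pvBloop, if_neg]
  intro hc
  apply h
  refine ⟨hc.1, ?_⟩
  rw [PySem.List.slice_natCast_add] at hc
  rw [pvMatch, List.prefix_iff_eq_take, ht]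
  exact hc.2.symm

theorem pvBloop_skip_all (tl t : List Char) (m : Nat) (ht : t.length = m)
    (l1 l2 : List Nat) (p : Nat) (h : ∀ i ∈ l1, ¬ (p ≤ i ∧ pvMatch tl t i)) :
    pvBloop tl t m (l1 ++ l2) p = pvBloop tl t m l2 p := by
  induction l1 with
  | nil => rfl
  | cons a l ih =>
    rw [List.cons_append, pvBloop_cond_neg tl t m ht a p _ (h a (by simp))]
    exact ih (fun i hi => h i (by simp [hi]))

theorem pvLoop_eq (tl t : List Char) (m : Nat) (ht : t.length = m) (hm : 1 ≤ m) :
    ∀ fuel p i0, tl.length - p < fuel → i0 ≤ p →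
      pvAloop tl t m fuel p = pvBloop tl t m (List.range' i0 (tl.length + 1 - m - i0)) p := by
  intro fuel
  induction fuel with
  | zero => intro p i0 hfu _; omega
  | succ fuel ih =>
    intro p i0 hfu hi0
    rw [pvAloop]
    by_cases hs : p < tl.length
    · rw [if_pos hs]
      rw [PySem.Chars.findFrom_natCast tl t p (le_of_lt hs)]
      by_cases hf : PySem.Chars.find (List.drop p tl) t = -1
      · rw [if_pos hf, if_pos (by norm_num)]
        have hnoin : ¬ t <:+: List.drop p tl := (PySem.Chars.find_eq_neg_one_iff _ _).mp hf
        refine Eq.symm ?_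
        have hap := pvBloop_skip_all tl t m ht (List.range' i0 (tl.length + 1 - m - i0)) [] p ?_
        · simpa using hap
        intro i _ hc
        rcases hc with ⟨hpi, hpref⟩
        apply hnoin
        have hdd : List.drop i tl = List.drop (i - p) (List.drop p tl) := by
          rw [List.drop_drop]; congr 1; omega
        rw [pvMatch, hdd] at hpref
        exact hpref.isInfix.trans (List.drop_suffix _ _).isInfix
      · rw [if_neg hf]
        have hfnn : 0 ≤ PySem.Chars.find (List.drop p tl) t := by
          have := PySem.Chars.neg_one_le_find (List.drop p tl) t
          omega
        have hspec := PySem.Chars.find_spec hfnn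
        set f := PySem.Chars.find (List.drop p tl) t with hfdef
        set jn := p + f.toNat with hjn
        have hnneg : ¬ ((p : Int) + f < 0) := by omega
        rw [if_neg hnneg]
        have hpref : t <+: List.drop jn tl := by
          have h1 := hspec.1
          rw [List.drop_drop] at h1
          exact h1
        have hmin : ∀ i, p ≤ i → i < jn → ¬ t <+: List.drop i tl := by
          intro i hpi hij hpf
          apply hspec.2 (i - p) (by omega)
          have heq : List.drop (i - p) (List.drop p tl) = List.drop i tl := by
            rw [List.drop_drop]; congr 1; omega
          rwa [heq]
        have hlen : m ≤ tl.length - jn := by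
          have := hpref.length_le
          simpa [ht] using this
        have hjN : jn < tl.length + 1 - m := by omega
        have hsplit : List.range' i0 (tl.length + 1 - m - i0)
            = List.range' i0 (jn - i0) ++ List.range' jn (tl.length + 1 - m - jn) := by
          have harith : tl.length + 1 - m - i0 = (jn - i0) + (tl.length + 1 - m - jn) := by omega
          rw [harith, ← List.range'_append_1]
          congr 2
          omega
        rw [hsplit, pvBloop_skip_all tl t m ht _ _ p ?side]
        case side =>
          intro i hi hc
          rcases List.mem_range'_1.mp hi with ⟨h1, h2⟩
          rcases hc with ⟨hpi, hpf⟩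
          exact hmin i hpi (by omega) hpf
        have hone : tl.length + 1 - m - jn = (tl.length + 1 - m - (jn + 1)) + 1 := by omega
        rw [hone, List.range'_succ,
          pvBloop_cond_pos tl t m ht jn p _ ⟨by omega, hpref⟩]
        have htail := ih (jn + m) (jn + 1) (by omega) (by omega)
        have hj2 : ((p : Int) + f).toNat + m = jn + m := by omega
        rw [hj2, htail]
        congr 2
        · omega
        · omega
    · rw [if_neg hs]
      refine Eq.symm ?_
      have hap := pvBloop_skip_all tl t m ht (List.range' i0 (tl.length + 1 - m - i0)) [] p ?_
      · simpa using hap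
      intro i hi hc
      rcases List.mem_range'_1.mp hi with ⟨h1, h2⟩
      rcases hc with ⟨hpi, _⟩
      omega

theorem pv_term_eq (tl t : List Char) (hm : 1 ≤ t.length) :
    pvAloop tl t t.length (tl.length + 1) 0
      = pvBloop tl t t.length (List.range (tl.length + 1 - t.length)) 0 := by
  rw [List.range_eq_range']
  have h := pvLoop_eq tl t t.length rfl hm (tl.length + 1) 0 0 (by omega) (le_refl 0)
  simpa using h

-- ===== VERDICT (by name: the statement is the Claim_ definition above) =====
theorem pv_step_eq (text : String) (ranges : List (Int × Int)) (term : String) :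
    (let normalized := (PySem.Str.strip term).toList
     if normalized.length < 2 then ranges
     else ranges ++ pvAloop text.toList normalized normalized.length (text.toList.length + 1) 0)
    = (let t := (PySem.Str.strip term).toList
       if t.length < 2 then ranges
       else ranges ++ pvBloop text.toList t t.length (List.range (text.toList.length + 1 - t.length)) 0) := by
  by_cases hlt : ((PySem.Str.strip term).toList).length < 2
  · simp only [if_pos hlt]
  · simp only [if_neg hlt, pv_term_eq text.toList _ (by omega : 1 ≤ ((PySem.Str.strip term).toList).length)]

theorem term_ranges_in_text_py_spec : Claim_equal_term_ranges_in_text_py := by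
  intro text terms _
  unfold Spec_term_ranges_in_text_py term_ranges_in_text_py term_ranges_in_text_py_alt
  refine congrArg (fun f => List.foldl f ([] : List (Int × Int)) terms) ?_
  funext ranges term
  exact pv_step_eq text ranges term
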